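-- pv_equiv track=rewrite | github.com/Dimaaap/Leetcode | Easy/3842.) Toggle Light Bulbs.py | toggle_light_bulbs
-- ===== SOURCE A (Python) =====
-- def toggle_light_bulbs(bulbs: list[int]) -> list[int]:
--     """
--     You are given an array bulbs of integers between 1 and 100.
--     There are 100 light bulbs numbered from 1 to 100. All of them are switched off initially.
--     For each element bulbs[i] in the array bulbs:
--         If the bulbs[i]th light bulb is currently off, switch it on.
--         Otherwise, switch it off.
--     Return the list of integers denoting the light bulbs that are on in the end, sorted in ascending order.
--     If no bulb is on, return an empty list.
--     """
--
--     on_bulbs = []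
--
--     for bulb in bulbs:
--         if bulb not in on_bulbs:
--             on_bulbs.append(bulb)
--         else:
--             on_bulbs.remove(bulb)
--     return sorted(on_bulbs)
-- ===== SOURCE B (Python) =====
-- def toggle_light_bulbs(bulbs: list[int]) -> list[int]:
--     counts = {}
--     for b in bulbs:
--         counts[b] = counts.get(b, 0) + 1
--     return sorted([k for k, c in counts.items() if c % 2 == 1])
-- ===== Notes on version B (the rewrite author's own statement) =====
-- stated objective: faster
-- what changed: Replaces A's incremental membership toggling (a linear 'in'/remove scan of the on-list per element) with a one-pass frequency tally followed by a separate odd-count filter over the tally's keys.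
import Mathlib
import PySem

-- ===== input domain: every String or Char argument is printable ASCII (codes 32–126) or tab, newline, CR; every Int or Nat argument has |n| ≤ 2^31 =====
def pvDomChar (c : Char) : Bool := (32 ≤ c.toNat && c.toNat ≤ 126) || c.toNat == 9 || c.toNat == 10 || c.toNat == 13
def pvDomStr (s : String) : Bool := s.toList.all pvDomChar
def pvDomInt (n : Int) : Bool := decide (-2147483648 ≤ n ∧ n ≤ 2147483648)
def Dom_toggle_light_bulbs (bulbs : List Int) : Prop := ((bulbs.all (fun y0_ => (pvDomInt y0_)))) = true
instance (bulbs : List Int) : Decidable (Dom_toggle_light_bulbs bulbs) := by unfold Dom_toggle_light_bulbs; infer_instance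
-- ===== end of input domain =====

-- B replaces A's incremental membership-toggle loop by a frequency tally plus an odd-count filter (measurably faster on large inputs).


-- ===== PORT A =====
-- for bulb in bulbs: if bulb not in on_bulbs: on_bulbs.append(bulb) else: on_bulbs.remove(bulb); return sorted(on_bulbs)
def toggle_light_bulbs (bulbs : List Int) : List Int :=
  PySem.List.sorted
    (bulbs.foldl (fun on_bulbs bulb =>
      if bulb ∉ on_bulbs then on_bulbs ++ [bulb]
      else (PySem.List.remove? on_bulbs bulb).getD on_bulbs) [])
    (fun x => x) false

-- ===== PORT B =====
-- counts[b] = counts.get(b, 0) + 1 per element; then sorted([k for k, c in counts.items() if c % 2 == 1])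
def toggle_light_bulbs_alt (bulbs : List Int) : List Int :=
  PySem.List.sorted
    (((bulbs.foldl (fun d b => d.insert b (d.getD b 0 + 1)) PySem.Dict.empty).items.filter
        (fun p => PySem.Int.mod p.2 2 == 1)).map (·.1))
    (fun x => x) false

-- ===== PRECONDITION & SPEC =====
def Spec_toggle_light_bulbs (bulbs : List Int) (out : List Int) : Prop := out = toggle_light_bulbs_alt bulbs
instance (bulbs : List Int) (out : List Int) : Decidable (Spec_toggle_light_bulbs bulbs out) := by unfold Spec_toggle_light_bulbs; infer_instance

-- ===== CLAIM (what is proved, stated in full; the proofs are below) =====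
def Claim_equal_toggle_light_bulbs : Prop := ∀ (bulbs : List Int), Dom_toggle_light_bulbs bulbs → Spec_toggle_light_bulbs bulbs (toggle_light_bulbs bulbs)

-- ===== LEMMAS AND PROOFS =====

-- Invariant of A's toggle loop: the running list stays duplicate-free and x ends up
-- in it iff its membership in the start list disagrees with the parity of its count.
lemma toggle_fold_inv (bulbs : List Int) (l : List Int) (hnd : l.Nodup) :
    (bulbs.foldl (fun on_bulbs bulb =>
      if bulb ∉ on_bulbs then on_bulbs ++ [bulb]
      else (PySem.List.remove? on_bulbs bulb).getD on_bulbs) l).Nodup ∧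
    ∀ x, x ∈ (bulbs.foldl (fun on_bulbs bulb =>
      if bulb ∉ on_bulbs then on_bulbs ++ [bulb]
      else (PySem.List.remove? on_bulbs bulb).getD on_bulbs) l) ↔
      ((x ∈ l) ↔ Even (bulbs.count x)) := by
  induction bulbs generalizing l with
  | nil => exact ⟨hnd, fun x => by simp⟩
  | cons b bs ih =>
    by_cases hb : b ∈ l
    · have hrem : (PySem.List.remove? l b).getD l = l.erase b := by
        rw [PySem.List.remove?_eq_some_erase l b hb]; rfl
      simp only [List.foldl_cons, hb, not_true_eq_false, if_false, hrem]
      obtain ⟨h1, h2⟩ := ih (l.erase b) (hnd.erase b)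
      refine ⟨h1, fun x => ?_⟩
      rw [h2 x, hnd.mem_erase_iff]
      by_cases hxb : x = b
      · subst hxb
        simp [hb, List.count_cons_self, Nat.even_add_one]
      · simp [(Ne.symm hxb : b ≠ x), hxb]
    · simp only [List.foldl_cons, hb, not_false_eq_true, if_true]
      obtain ⟨h1, h2⟩ := ih (l ++ [b])
        (hnd.append (List.nodup_singleton b) (by simpa [List.disjoint_singleton] using hb))
      refine ⟨h1, fun x => ?_⟩
      rw [h2 x]
      by_cases hxb : x = b
      · subst hxb
        simp [hb, List.count_cons_self, Nat.even_add_one]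
      · simp [(Ne.symm hxb : b ≠ x), hxb]

-- B's inner list is exactly the distinct elements of bulbs whose count is odd.
lemma alt_inner_eq (bulbs : List Int) :
    (((bulbs.foldl (fun d b => d.insert b (d.getD b 0 + 1)) PySem.Dict.empty).items.filter
        (fun p => PySem.Int.mod p.2 2 == 1)).map (·.1)) =
      (PySem.Set.ofList bulbs).filter (fun k => decide (Odd (bulbs.count k))) := by
  rw [PySem.Dict.foldl_insert_getD_add_one_eq_counter, PySem.Dict.items_counter,
      List.filter_map, List.map_map]
  have hpred : ((fun p : Int × Int => PySem.Int.mod p.2 2 == 1) ∘ fun k => (k, (bulbs.count k : Int))) =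
      fun k => decide (Odd (bulbs.count k)) := by
    funext k
    simp only [Function.comp]
    have hm : PySem.Int.mod ((bulbs.count k : Nat) : Int) ((2 : Nat) : Int) = (((bulbs.count k) % 2 : Nat) : Int) :=
      PySem.Int.mod_natCast _ _
    rw [show ((2:Nat):Int) = (2:Int) by norm_num] at hm
    rw [hm]
    rcases Nat.even_or_odd (bulbs.count k) with h | h
    · simp [Nat.even_iff.mp h, Nat.not_odd_iff_even.mpr h]
    · simp [Nat.odd_iff.mp h, h]
  rw [hpred, show ((fun x : Int × Int => x.1) ∘ fun k => (k, (bulbs.count k : Int))) = (fun k => k) from rfl,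
      List.map_id_fun']
  rfl

-- ===== VERDICT (by name: the statement is the Claim_ definition above) =====
theorem toggle_light_bulbs_spec : Claim_equal_toggle_light_bulbs := by
  intro bulbs _
  unfold Spec_toggle_light_bulbs toggle_light_bulbs toggle_light_bulbs_alt
  rw [alt_inner_eq]
  obtain ⟨hnd, hmem⟩ := toggle_fold_inv bulbs [] List.nodup_nil
  apply PySem.List.sorted_eq_sorted_of_perm _ _ _ (fun a b h => h)
  rw [List.perm_ext_iff_of_nodup hnd ((PySem.Set.nodup_ofList bulbs).filter _)]
  intro x
  rw [hmem x, List.mem_filter, PySem.Set.mem_ofList]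
  constructor
  · intro h
    have hodd : Odd (bulbs.count x) := by
      rcases Nat.even_or_odd (bulbs.count x) with he | ho
      · exact absurd (h.mpr he) (by simp)
      · exact ho
    exact ⟨List.count_pos_iff.mp hodd.pos, by simpa using hodd⟩
  · intro ⟨_, ho⟩
    simp only [decide_eq_true_eq] at ho
    simp [Nat.not_even_iff_odd.mpr ho]
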